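-- pv_equiv track=rewrite | github.com/wangGame/FridaHookGame | src/dump.py | to_c_type
-- ===== SOURCE A (Python) =====
-- TYPE_MAP = {
--     "System.Void": "void",
--     "System.Boolean": "bool",
--     "System.Byte": "uint8",
--     "System.SByte": "int8",
--     "System.Int16": "int16",
--     "System.UInt16": "uint16",
--     "System.Int32": "int32",
--     "System.UInt32": "uint32",
--     "System.Int64": "int64",
--     "System.UInt64": "uint64",
--     "System.Single": "float",
--     "System.Double": "double",
--     "System.IntPtr": "void *",
--     "System.UIntPtr": "void *",
--     "System.String": "void *",  # 你也可以改成 Il2CppString*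
--     "System.Object": "void *",  # Il2CppObject*
-- }
--
-- def to_c_type(il2cpp_type: str) -> str:
--     if not il2cpp_type:
--         return "void *"
--
--     t = il2cpp_type.strip()
--
--     # 数组、泛型、引用等复杂类型：先粗暴当指针
--     # 你后面要精确，我们再做解析器
--     if "<" in t or ">" in t:
--         return "void *"
--     if t.endswith("[]"):
--         return "void *"
--
--     # 处理 ByRef（有些工具会显示 & 或 * 或 'System.Int32&'）
--     if t.endswith("&"):
--         base = t[:-1]
--         return to_c_type(base) + " *"
--
--     # 去掉 namespace 前缀差异（有些会给 fullName）
--     return TYPE_MAP.get(t, "void *")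
-- ===== SOURCE B (Python) =====
-- TYPE_MAP = {
--     "System.Void": "void",
--     "System.Boolean": "bool",
--     "System.Byte": "uint8",
--     "System.SByte": "int8",
--     "System.Int16": "int16",
--     "System.UInt16": "uint16",
--     "System.Int32": "int32",
--     "System.UInt32": "uint32",
--     "System.Int64": "int64",
--     "System.UInt64": "uint64",
--     "System.Single": "float",
--     "System.Double": "double",
--     "System.IntPtr": "void *",
--     "System.UIntPtr": "void *",
--     "System.String": "void *",
--     "System.Object": "void *",
-- }
--
-- def to_c_type(il2cpp_type: str) -> str:
--     if not il2cpp_type: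
--         return "void *"
--     s = il2cpp_type.strip()
--     if "<" in s or ">" in s:
--         return "void *"
--     # peel the whole trailing run of '&' and whitespace in one right-to-left scan
--     i = len(s)
--     stars = 0
--     while i > 0 and (s[i - 1] == "&" or s[i - 1].isspace()):
--         if s[i - 1] == "&":
--             stars += 1
--         i -= 1
--     core = s[:i]
--     if core.endswith("[]"):
--         return "void *" + " *" * stars
--     return TYPE_MAP.get(core, "void *") + " *" * stars
-- ===== Notes on version B (the rewrite author's own statement) =====
-- stated objective: alternative
-- what changed: Replaced A's ByRef recursion, which re-strips and re-scans the string once per trailing ampersand, by one initial strip, one hoisted angle-bracket check, and a single right-to-left scan that peels the whole trailing run of ampersands and whitespace while counting stars, followed by one TYPE_MAP lookup.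
import Mathlib
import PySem

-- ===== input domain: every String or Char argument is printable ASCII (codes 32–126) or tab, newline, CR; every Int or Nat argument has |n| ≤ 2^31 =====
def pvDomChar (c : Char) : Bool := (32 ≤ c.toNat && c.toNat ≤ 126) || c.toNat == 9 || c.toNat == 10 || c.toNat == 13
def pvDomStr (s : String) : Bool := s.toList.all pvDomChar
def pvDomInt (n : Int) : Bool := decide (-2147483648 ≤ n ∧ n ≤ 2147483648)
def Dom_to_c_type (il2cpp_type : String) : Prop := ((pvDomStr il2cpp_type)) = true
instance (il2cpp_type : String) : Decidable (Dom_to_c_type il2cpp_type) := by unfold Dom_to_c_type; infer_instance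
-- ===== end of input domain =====

-- B replaces A's ByRef recursion (re-strip + re-scan per trailing '&') by one strip, one
-- hoisted '<'/'>' check, and a single right-to-left scan peeling the whole trailing
-- '&'/whitespace run while counting stars (alternative decomposition).

-- termination helper for port A (strip never lengthens its input)
lemma strip_length_le (t : List Char) : (PySem.Chars.strip t).length ≤ t.length := by
  have h1 := List.length_dropWhile_le (p := PySem.Chars.isspace) (l := t)
  have h2 := List.length_dropWhile_le (p := PySem.Chars.isspace)
    (l := (List.dropWhile PySem.Chars.isspace t).reverse)
  simp only [PySem.Chars.strip, PySem.Chars.lstrip, PySem.Chars.rstrip,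
    List.length_reverse] at *
  omega

-- ===== PORT A =====
-- TYPE_MAP, on the char-list side (keys/values are ASCII literals)
def typeMap : PySem.Dict (List Char) (List Char) :=
  PySem.Dict.ofList
  [("System.Void".toList, "void".toList),
   ("System.Boolean".toList, "bool".toList),
   ("System.Byte".toList, "uint8".toList),
   ("System.SByte".toList, "int8".toList),
   ("System.Int16".toList, "int16".toList),
   ("System.UInt16".toList, "uint16".toList),
   ("System.Int32".toList, "int32".toList),
   ("System.UInt32".toList, "uint32".toList),
   ("System.Int64".toList, "int64".toList),
   ("System.UInt64".toList, "uint64".toList),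
   ("System.Single".toList, "float".toList),
   ("System.Double".toList, "double".toList),
   ("System.IntPtr".toList, "void *".toList),
   ("System.UIntPtr".toList, "void *".toList),
   ("System.String".toList, "void *".toList),
   ("System.Object".toList, "void *".toList)]

-- A's body on List Char; the 'if not il2cpp_type' falsy guard is the t = [] branch
def to_c_type_core (t : List Char) : List Char :=
  if t = [] then "void *".toList
  else
    let s := PySem.Chars.strip t
    if PySem.Chars.isIn "<".toList s || PySem.Chars.isIn ">".toList s then "void *".toList
    else if PySem.Chars.endswith s "[]".toList then "void *".toList
    else if PySem.Chars.endswith s "&".toList then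
      to_c_type_core (PySem.Chars.slice s none (some (-1))) ++ " *".toList
    else PySem.Dict.getD typeMap s "void *".toList
termination_by t.length
decreasing_by
  rename_i hamp
  have hle : (PySem.Chars.strip t).length ≤ t.length := strip_length_le t
  have h1 : 1 ≤ (PySem.Chars.strip t).length := by
    have := ((PySem.Chars.endswith_iff _ _).mp hamp).length_le
    simpa using this
  simp only [PySem.Chars.slice_eq_listSlice, PySem.List.slice_to_neg_one, List.length_dropLast]
  omega

def to_c_type (il2cpp_type : String) : String :=
  String.ofList (to_c_type_core il2cpp_type.toList)

-- ===== PORT B =====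
-- B's index-from-the-right while loop, transcribed as recursion over the reversed
-- char list (s[i-1] is the head of the unconsumed reversed suffix); returns the
-- reversed remaining prefix and the '&' count
def peelRev (r : List Char) (stars : Nat) : List Char × Nat :=
  match r with
  | [] => ([], stars)
  | c :: rest =>
      if c = '&' then peelRev rest (stars + 1)
      else if PySem.Chars.isspace c then peelRev rest stars
      else (c :: rest, stars)

def to_c_type_alt (il2cpp_type : String) : String :=
  if il2cpp_type.toList = [] then "void *"
  else
    let s := PySem.Chars.strip il2cpp_type.toList
    if PySem.Chars.isIn "<".toList s || PySem.Chars.isIn ">".toList s then "void *"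
    else
      let p := peelRev s.reverse 0
      let core := p.1.reverse
      let base := if PySem.Chars.endswith core "[]".toList then "void *".toList
                  else PySem.Dict.getD typeMap core "void *".toList
      String.ofList (base ++ PySem.List.pyRepeat " *".toList (p.2 : Int))

-- ===== PRECONDITION & SPEC =====
def Spec_to_c_type (il2cpp_type : String) (out : String) : Prop := out = to_c_type_alt il2cpp_type
instance (il2cpp_type : String) (out : String) : Decidable (Spec_to_c_type il2cpp_type out) := by unfold Spec_to_c_type; infer_instance

-- ===== CLAIM (what is proved, stated in full; the proofs are below) =====
def Claim_equal_to_c_type : Prop := ∀ (il2cpp_type : String), Dom_to_c_type il2cpp_type → Spec_to_c_type il2cpp_type (to_c_type il2cpp_type)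

-- ===== LEMMAS AND PROOFS =====

-- finishB: what B does with the scan result
def finishB (p : List Char × Nat) : List Char :=
  (if PySem.Chars.endswith p.1.reverse "[]".toList then "void *".toList
   else PySem.Dict.getD typeMap p.1.reverse "void *".toList)
  ++ PySem.List.pyRepeat " *".toList (p.2 : Int)

lemma rep_succ (n : Nat) :
    " *".toList ++ PySem.List.pyRepeat " *".toList (n : Int)
      = PySem.List.pyRepeat " *".toList ((n + 1 : Nat) : Int) := by
  simp [PySem.List.pyRepeat, List.replicate_succ]

lemma isIn_single_iff (c : Char) (l : List Char) :
    PySem.Chars.isIn [c] l = true ↔ c ∈ l := by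
  rw [PySem.Chars.isIn_iff_infix]
  constructor
  · intro h
    have := h.sublist.subset
    exact this (List.mem_singleton_self c)
  · intro h
    obtain ⟨p, q, rfl⟩ := List.append_of_mem h
    exact ⟨p, q, by simp⟩

lemma peelRev_dropWhile (r : List Char) (m : Nat) :
    peelRev (List.dropWhile PySem.Chars.isspace r) m = peelRev r m := by
  induction r generalizing m with
  | nil => rfl
  | cons c rest ih =>
    by_cases hc : PySem.Chars.isspace c = true
    · have hamp : c ≠ '&' := by
        intro h; subst h; exact absurd hc (by decide)
      rw [List.dropWhile_cons_of_pos hc, ih]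
      simp [peelRev, hamp, hc]
    · rw [List.dropWhile_cons_of_neg hc]

lemma strip_reverse_eq (t : List Char) :
    (PySem.Chars.strip t).reverse
      = List.dropWhile PySem.Chars.isspace ((List.dropWhile PySem.Chars.isspace t).reverse) := by
  simp [PySem.Chars.strip, PySem.Chars.lstrip, PySem.Chars.rstrip]

lemma dropWhile_cons_prop {p : Char → Bool} {t l : List Char} {c : Char}
    (h : List.dropWhile p t = c :: l) : p c = false := by
  induction t with
  | nil => simp at h
  | cons a rest ih =>
    by_cases ha : p a = true
    · rw [List.dropWhile_cons_of_pos ha] at h; exact ih h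
    · rw [List.dropWhile_cons_of_neg ha] at h
      cases h; simpa using ha

lemma strip_head_not_space {t : List Char} {c : Char} {l : List Char}
    (h : PySem.Chars.strip t = c :: l) : PySem.Chars.isspace c = false := by
  have hrev := strip_reverse_eq t
  set d := List.dropWhile PySem.Chars.isspace t with hd
  obtain ⟨pre, hpre⟩ := List.dropWhile_suffix (l := d.reverse) (p := PySem.Chars.isspace)
  have hdeq : d = (PySem.Chars.strip t) ++ pre.reverse := by
    have : d.reverse = pre ++ (PySem.Chars.strip t).reverse := by
      rw [hrev]; exact hpre.symm
    have := congrArg List.reverse this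
    simpa using this
  rw [h] at hdeq
  have : List.dropWhile PySem.Chars.isspace t = c :: (l ++ pre.reverse) := by
    rw [← hd]; simpa using hdeq
  exact dropWhile_cons_prop this

lemma mem_strip {t : List Char} {c : Char} (h : c ∈ PySem.Chars.strip t) : c ∈ t := by
  have h1 : c ∈ (PySem.Chars.strip t).reverse := by simpa using h
  rw [strip_reverse_eq] at h1
  have h2 := (List.dropWhile_sublist _).mem h1
  have h3 : c ∈ List.dropWhile PySem.Chars.isspace t := by simpa using h2
  exact (List.dropWhile_sublist _).mem h3

lemma strip_nil : PySem.Chars.strip ([] : List Char) = [] := by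
  simp [PySem.Chars.strip, PySem.Chars.lstrip, PySem.Chars.rstrip]

-- the stripped-empty case of the main lemma
lemma main_lemma_nilstrip (t : List Char) (hs : PySem.Chars.strip t = []) (k : Nat) :
    to_c_type_core t ++ PySem.List.pyRepeat " *".toList (k : Int)
      = finishB (peelRev (PySem.Chars.strip t).reverse k) := by
  have hg : PySem.Dict.getD typeMap [] ['v','o','i','d',' ','*'] = ['v','o','i','d',' ','*'] := by
    decide
  have he : PySem.Chars.endswith ([] : List Char) ['[',']'] = false := by decide
  have he2 : PySem.Chars.endswith ([] : List Char) ['&'] = false := by decide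
  have hi1 : PySem.Chars.isIn ['<'] ([] : List Char) = false := by decide
  have hi2 : PySem.Chars.isIn ['>'] ([] : List Char) = false := by decide
  rw [hs]
  by_cases ht : t = []
  · subst ht
    rw [to_c_type_core]
    simp [finishB, peelRev, hg, he]
  · rw [to_c_type_core]
    simp only [if_neg ht, hs]
    simp [finishB, peelRev, hg, he, he2, hi1, hi2]

lemma main_lemma (n : Nat) : ∀ (t : List Char), t.length ≤ n →
    PySem.Chars.isIn "<".toList (PySem.Chars.strip t) = false →
    PySem.Chars.isIn ">".toList (PySem.Chars.strip t) = false →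
    ∀ (k : Nat),
      to_c_type_core t ++ PySem.List.pyRepeat " *".toList (k : Int)
        = finishB (peelRev (PySem.Chars.strip t).reverse k) := by
  induction n with
  | zero =>
    intro t ht _ _ k
    have : t = [] := List.eq_nil_of_length_eq_zero (Nat.le_zero.mp ht)
    exact main_lemma_nilstrip t (by rw [this]; exact strip_nil) k
  | succ n ih =>
    intro t ht hlt hgt k
    cases hrev : (PySem.Chars.strip t).reverse with
    | nil =>
      have hs : PySem.Chars.strip t = [] := by simpa using congrArg List.reverse hrev
      have h := main_lemma_nilstrip t hs k
      rw [hs] at h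
      exact h
    | cons c r =>
      have hstrip : PySem.Chars.strip t = r.reverse ++ [c] := by
        have := congrArg List.reverse hrev
        simpa using this
      have htne : t ≠ [] := by
        intro h; rw [h, strip_nil] at hrev; simp at hrev
      have hslen : (PySem.Chars.strip t).length = r.length + 1 := by
        rw [hstrip]; simp
      by_cases hamp : c = '&'
      · -- trailing '&': A recurses on dropLast, B counts a star
        subst hamp
        have hend_amp : PySem.Chars.endswith (PySem.Chars.strip t) "&".toList = true := by
          rw [PySem.Chars.endswith_iff]
          exact ⟨r.reverse, by rw [hstrip, show "&".toList = ['&'] from by decide]⟩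
        have hend_sq : PySem.Chars.endswith (PySem.Chars.strip t) "[]".toList = false := by
          rw [Bool.eq_false_iff]
          intro h
          obtain ⟨pre, hpre⟩ := (PySem.Chars.endswith_iff _ _).mp h
          rw [hstrip] at hpre
          have := congrArg (fun l => l.getLast?) hpre
          simp at this
        have hu : PySem.Chars.slice (PySem.Chars.strip t) none (some (-1)) = r.reverse := by
          simp only [PySem.Chars.slice_eq_listSlice, PySem.List.slice_to_neg_one, hstrip]
          simp
        rw [to_c_type_core]
        simp only [if_neg htne, hlt, hgt, hend_sq, hend_amp, Bool.or_self, Bool.false_eq_true,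
          if_false, if_true, hu]
        rw [List.append_assoc, rep_succ k]
        -- angle hypotheses for r.reverse
        have hsub : ∀ x, x ∈ PySem.Chars.strip r.reverse → x ∈ PySem.Chars.strip t := by
          intro x hx
          have h1 : x ∈ r.reverse := mem_strip hx
          rw [hstrip]
          exact List.mem_append_left _ h1
        have hu_lt : PySem.Chars.isIn "<".toList (PySem.Chars.strip r.reverse) = false := by
          rw [Bool.eq_false_iff]
          intro h
          have h2 := (isIn_single_iff '<' _).mpr (hsub _ ((isIn_single_iff '<' _).mp h))
          rw [show "<".toList = ['<'] from rfl] at hlt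
          rw [hlt] at h2; exact Bool.false_ne_true h2
        have hu_gt : PySem.Chars.isIn ">".toList (PySem.Chars.strip r.reverse) = false := by
          rw [Bool.eq_false_iff]
          intro h
          have h2 := (isIn_single_iff '>' _).mpr (hsub _ ((isIn_single_iff '>' _).mp h))
          rw [show ">".toList = ['>'] from rfl] at hgt
          rw [hgt] at h2; exact Bool.false_ne_true h2
        have hulen : r.reverse.length ≤ n := by
          have h1 := strip_length_le t
          simp only [List.length_reverse]
          omega
        have hih := ih r.reverse hulen hu_lt hu_gt (k + 1)
        rw [hih]
        -- (strip r.reverse).reverse = dropWhile isspace r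
        have hsr : (PySem.Chars.strip r.reverse).reverse = List.dropWhile PySem.Chars.isspace r := by
          cases hr : r.reverse with
          | nil =>
            have hr0 : r = [] := by simpa using congrArg List.reverse hr
            subst hr0
            rw [strip_nil]
            rfl
          | cons d l' =>
            have hd : PySem.Chars.isspace d = false := by
              apply strip_head_not_space (t := t)
              rw [hstrip, hr]; rfl
            have hdw : List.dropWhile PySem.Chars.isspace (d :: l') = d :: l' :=
              List.dropWhile_cons_of_neg (by simp [hd])
            rw [strip_reverse_eq, hdw, ← hr]
            simp
        rw [hsr, peelRev_dropWhile]
        -- RHS: one step of peelRev on '&' :: r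
        simp [peelRev]
      · -- last char is not '&': both sides look the core up (or see '[]')
        have hcs : PySem.Chars.isspace c = false := by
          have := strip_reverse_eq t
          rw [hrev] at this
          exact dropWhile_cons_prop this.symm
        have hend_amp : PySem.Chars.endswith (PySem.Chars.strip t) "&".toList = false := by
          rw [Bool.eq_false_iff]
          intro h
          obtain ⟨pre, hpre⟩ := (PySem.Chars.endswith_iff _ _).mp h
          rw [hstrip] at hpre
          have := congrArg (fun l => l.getLast?) hpre
          simp at this
          exact hamp this.symm
        rw [to_c_type_core]
        simp only [if_neg htne, hlt, hgt, hend_amp, Bool.or_self, Bool.false_eq_true, if_false]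
        have hpeel : peelRev (c :: r) k = (c :: r, k) := by
          simp [peelRev, hamp, hcs]
        rw [hpeel]
        simp only [finishB]
        have : (c :: r).reverse = PySem.Chars.strip t := by
          have := congrArg List.reverse hrev
          simpa using this.symm
        rw [this]

-- ===== VERDICT (by name: the statement is the Claim_ definition above) =====
theorem to_c_type_spec : Claim_equal_to_c_type := by
  intro x _
  unfold Spec_to_c_type to_c_type to_c_type_alt
  by_cases hx : x.toList = []
  · rw [hx, if_pos rfl, to_c_type_core]
    simp
  · rw [if_neg hx]
    by_cases hang : (PySem.Chars.isIn "<".toList (PySem.Chars.strip x.toList)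
        || PySem.Chars.isIn ">".toList (PySem.Chars.strip x.toList)) = true
    · rw [to_c_type_core]
      simp only [if_neg hx, hang, if_true]
      rfl
    · have hor := hang
      rw [Bool.or_eq_true, not_or] at hor
      have hlt : PySem.Chars.isIn "<".toList (PySem.Chars.strip x.toList) = false :=
        Bool.eq_false_iff.mpr hor.1
      have hgt : PySem.Chars.isIn ">".toList (PySem.Chars.strip x.toList) = false :=
        Bool.eq_false_iff.mpr hor.2
      have h := main_lemma x.toList.length x.toList le_rfl hlt hgt 0
      have hrep : PySem.List.pyRepeat " *".toList ((0 : Nat) : Int) = [] := by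
        simp [PySem.List.pyRepeat]
      rw [hrep, List.append_nil] at h
      simp only [hlt, hgt, Bool.or_self, Bool.false_eq_true, if_false]
      rw [h]
      rfl
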